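-- pv_equiv track=rewrite | github.com/Hojott/tira | vko3/samechar.py | count
-- ===== SOURCE A (Python) =====
-- def count(s):
--     c = 0
--     a = 0
--     for i in range(len(s)):
--         if s[i] != s[a]:
--             a = i
--         c += i - a + 1
--     return c
-- ===== SOURCE B (Python) =====
-- def count(s):
--     total = 0
--     i = 0
--     n = len(s)
--     while i < n:
--         j = i + 1
--         while j < n and s[j] == s[i]:
--             j += 1
--         run = j - i
--         total += run * (run + 1) // 2
--         i = j
--     return total
-- ===== Notes on version B (the rewrite author's own statement) =====
-- stated objective: alternative
-- what changed: Replaces A's per-character running-start accumulator (adding i-a+1 at every index) with a per-run scan that finds each maximal run of equal characters and adds its triangular number run*(run+1)//2 in closed form.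
import Mathlib
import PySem

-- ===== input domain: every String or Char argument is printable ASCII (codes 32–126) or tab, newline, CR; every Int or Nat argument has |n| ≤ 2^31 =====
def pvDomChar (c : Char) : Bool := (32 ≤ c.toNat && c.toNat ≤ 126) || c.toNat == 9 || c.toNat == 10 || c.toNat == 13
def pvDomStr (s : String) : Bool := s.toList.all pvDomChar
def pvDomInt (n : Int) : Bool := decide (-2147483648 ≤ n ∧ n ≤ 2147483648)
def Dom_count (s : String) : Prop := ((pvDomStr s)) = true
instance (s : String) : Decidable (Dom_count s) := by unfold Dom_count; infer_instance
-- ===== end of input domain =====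

-- B replaces A's per-character running-start accumulator with a per-run scan adding each run's triangular number in closed form (alternative decomposition, same O(n) cost).


-- ===== PORT A =====
-- loop body of A: s[i] and s[a] are in-range nonnegative indices (0 ≤ a ≤ i < len s), so getD is exact
def countStep (l : List Char) (st : Int × Nat) (i : Nat) : Int × Nat :=
  let a := if l.getD i ' ' ≠ l.getD st.2 ' ' then i else st.2
  (st.1 + ((i : Int) - (a : Int) + 1), a)

def count (s : String) : Int :=
  ((List.range s.toList.length).foldl (countStep s.toList) (0, 0)).1

-- ===== PORT B =====
def pvTri (n : Nat) : Int := ((n * (n + 1)) / 2 : Nat)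

-- B's outer while loop; the inner while scanning the run forward is takeWhile/dropWhile
def countRuns : List Char → Int
  | [] => 0
  | c :: t =>
    pvTri (1 + (t.takeWhile (fun d => d == c)).length)
      + countRuns (t.dropWhile (fun d => d == c))
  termination_by l => l.length
  decreasing_by
    exact Nat.lt_succ_of_le (List.length_dropWhile_le _ _)

def count_alt (s : String) : Int := countRuns s.toList

-- ===== PRECONDITION & SPEC =====
def Spec_count (s : String) (out : Int) : Prop := out = count_alt s
instance (s : String) (out : Int) : Decidable (Spec_count s out) := by unfold Spec_count; infer_instance

-- ===== CLAIM (what is proved, stated in full; the proofs are below) =====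
def Claim_equal_count : Prop := ∀ (s : String), Dom_count s → Spec_count s (count s)

-- ===== LEMMAS AND PROOFS =====

-- proof helper: A's loop seen with the current run length r (x = char of the current run)
def pvH : List Char → Char → Nat → Int
  | [], _, _ => 0
  | d :: t, x, r => if d = x then ((r : Int) + 1) + pvH t x (r + 1) else 1 + pvH t d 1

theorem pvTri_succ (n : Nat) : pvTri (n + 1) = pvTri n + ((n : Int) + 1) := by
  unfold pvTri
  have e : (n + 1) * (n + 1 + 1) = n * (n + 1) + 2 * (n + 1) := by ring
  have h : (n + 1) * (n + 1 + 1) / 2 = n * (n + 1) / 2 + (n + 1) := by omega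
  rw [h]; push_cast; ring

theorem pv_getD_of_drop (l : List Char) (n : Nat) (d : Char) (t : List Char)
    (h : l.drop n = d :: t) : l.getD n ' ' = d := by
  have h1 : (l.drop n).head? = l[n]? := List.head?_drop
  rw [List.getD_eq_getElem?_getD, ← h1, h]; rfl

theorem pv_fold_eq_pvH (t : List Char) : ∀ (l : List Char) (a r : Nat) (c : Int),
    l.drop (a + r) = t →
    ((List.range' (a + r) t.length).foldl (countStep l) (c, a)).1
      = c + pvH t (l.getD a ' ') r := by
  induction t with
  | nil => intro l a r c _; simp [pvH]
  | cons d t ih =>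
    intro l a r c hdrop
    have hd : l.getD (a + r) ' ' = d := pv_getD_of_drop l (a + r) d t hdrop
    have hdrop' : l.drop (a + r + 1) = t := by
      have := List.drop_drop (l := l) (i := 1) (j := a + r)
      simpa [hdrop] using this.symm
    rw [List.length_cons, List.range'_succ, List.foldl_cons]
    by_cases hx : d = l.getD a ' '
    · have hstep : countStep l (c, a) (a + r)
          = (c + ((r : Int) + 1), a) := by
        simp only [countStep, hd, hx, ne_eq, not_true_eq_false, if_false,
          Prod.mk.injEq]
        exact ⟨by push_cast; ring, trivial⟩
      rw [hstep]
      have h2 : l.drop (a + (r + 1)) = t := by rw [← Nat.add_assoc]; exact hdrop'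
      have := ih l a (r + 1) (c + ((r : Int) + 1)) h2
      rw [← Nat.add_assoc] at this
      rw [this, pvH, if_pos hx]
      ring
    · have hstep : countStep l (c, a) (a + r)
          = (c + 1, a + r) := by
        simp only [countStep, hd, hx, ne_eq, not_false_eq_true, if_true,
          Prod.mk.injEq]
        exact ⟨by push_cast; ring, trivial⟩
      rw [hstep]
      have h2 : l.drop ((a + r) + 1) = t := hdrop'
      have := ih l (a + r) 1 (c + 1) h2
      rw [pv_getD_of_drop l (a + r) d t hdrop] at this
      rw [this, pvH, if_neg hx]
      ring
  
theorem pvH_eq_runs (t : List Char) : ∀ (x : Char) (r : Nat),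
    pvH t x r = pvTri (r + (t.takeWhile (fun d => d == x)).length) - pvTri r
      + countRuns (t.dropWhile (fun d => d == x)) := by
  induction t with
  | nil => intro x r; simp [pvH, countRuns]
  | cons d t ih =>
    intro x r
    by_cases hx : d = x
    · rw [pvH]
      simp only [hx, if_true, List.takeWhile_cons, List.dropWhile_cons, beq_self_eq_true,
        if_true, List.length_cons]
      rw [ih x (r + 1)]
      have h1 : r + ((t.takeWhile (fun d => d == x)).length + 1)
          = (r + 1) + (t.takeWhile (fun d => d == x)).length := by omega
      rw [h1, pvTri_succ]
      ring
    · rw [pvH]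
      have hb : (d == x) = false := by simp [hx]
      simp only [hx, if_false, List.takeWhile_cons, List.dropWhile_cons, hb,
        Bool.false_eq_true, if_false, List.length_nil, Nat.add_zero, sub_self, zero_add]
      rw [ih d 1]
      rw [countRuns]
      have h1 : (1 : Nat) + (t.takeWhile (fun e => e == d)).length
          = (t.takeWhile (fun e => e == d)).length + 1 := by omega
      rw [h1, pvTri_succ]
      unfold pvTri
      norm_num
      ring

theorem count_eq_count_alt (s : String) : count s = count_alt s := by
  unfold count count_alt
  cases h : s.toList with
  | nil => simp [countRuns]
  | cons d t =>
    have h0 : (d :: t).drop (0 + 0) = d :: t := rfl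
    have := pv_fold_eq_pvH (d :: t) (d :: t) 0 0 0 h0
    rw [List.range_eq_range']
    simp only [Nat.add_zero] at this
    rw [this]
    have hgd : (d :: t).getD 0 ' ' = d := rfl
    rw [hgd, pvH_eq_runs (d :: t) d 0]
    simp only [List.takeWhile_cons, List.dropWhile_cons, beq_self_eq_true, if_true,
      List.length_cons, Nat.zero_add]
    rw [countRuns, Nat.add_comm 1]
    simp [pvTri]

-- ===== VERDICT (by name: the statement is the Claim_ definition above) =====
theorem count_spec : Claim_equal_count := by
  intro s _
  unfold Spec_count
  exact count_eq_count_alt s
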